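-- pv_equiv track=rewrite | github.com/ChrisPoul/Victor_Fernandez | AASAdministrator/Functions.py | get_correct_name
-- ===== SOURCE A (Python) =====
-- def get_correct_name(search_term, names_list):
--     similar_names = [name for name in names_list if name in search_term]
--
--     max_len = 0
--     larger_name = ""
--     for name in similar_names:
--         if len(name) > max_len:
--             max_len = len(name)
--             larger_name = name
--
--     return larger_name
-- ===== SOURCE B (Python) =====
-- def get_correct_name(search_term, names_list):
--     # Sort (stably) by length descending, then return the first substring match.
--     for name in sorted(names_list, key=len, reverse=True):
--         if name in search_term:
--             return name
--     return ""
-- ===== Notes on version B (the rewrite author's own statement) =====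
-- stated objective: alternative
-- what changed: Instead of filtering all substring candidates and then scanning for the first maximum-length one, B stably sorts the list by length descending and returns the first name that is a substring of search_term (stability preserves A's first-occurrence tie-breaking).
import Mathlib
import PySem

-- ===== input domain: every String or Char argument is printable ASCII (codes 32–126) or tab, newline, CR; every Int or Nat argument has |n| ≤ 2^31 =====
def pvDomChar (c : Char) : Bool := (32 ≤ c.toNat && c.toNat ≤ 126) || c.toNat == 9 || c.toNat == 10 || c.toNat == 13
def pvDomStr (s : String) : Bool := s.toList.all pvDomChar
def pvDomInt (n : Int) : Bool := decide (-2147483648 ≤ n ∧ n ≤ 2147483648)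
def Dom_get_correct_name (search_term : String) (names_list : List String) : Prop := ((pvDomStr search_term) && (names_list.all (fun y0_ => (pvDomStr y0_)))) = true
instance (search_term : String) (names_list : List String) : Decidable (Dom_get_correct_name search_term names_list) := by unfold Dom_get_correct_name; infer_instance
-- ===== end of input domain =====

-- ===== PORT A =====
def get_correct_name (search_term : String) (names_list : List String) : String :=
  let similar_names := names_list.filter (fun name => PySem.Str.isIn name search_term)
  let r := similar_names.foldl
    (fun (st : Int × String) name =>
      if PySem.Str.len name > st.1 then (PySem.Str.len name, name) else st)
    ((0 : Int), "")
  r.2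

-- ===== PORT B =====
-- B-side helper: the for-loop with early return over the sorted list
def firstSubstring (search_term : String) : List String → String
  | [] => ""
  | n :: t => if PySem.Str.isIn n search_term then n else firstSubstring search_term t

def get_correct_name_alt (search_term : String) (names_list : List String) : String :=
  firstSubstring search_term (PySem.List.sorted names_list PySem.Str.len true)

-- ===== PRECONDITION & SPEC =====
def Spec_get_correct_name (search_term : String) (names_list : List String) (out : String) : Prop := out = get_correct_name_alt search_term names_list
instance (search_term : String) (names_list : List String) (out : String) : Decidable (Spec_get_correct_name search_term names_list out) := by unfold Spec_get_correct_name; infer_instance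

-- ===== CLAIM (what is proved, stated in full; the proofs are below) =====
def Claim_equal_get_correct_name : Prop := ∀ (search_term : String) (names_list : List String), Dom_get_correct_name search_term names_list → Spec_get_correct_name search_term names_list (get_correct_name search_term names_list)

-- ===== LEMMAS AND PROOFS =====

-- descending-by-length order and the insertion predicate of sorted(·, key=len, reverse=True)
def lenDesc (a b : String) : Prop := PySem.Str.len b ≤ PySem.Str.len a

def befLen (a b : String) : Bool := decide (PySem.Str.len b < PySem.Str.len a)

lemma len_nonneg (s : String) : 0 ≤ PySem.Str.len s := by
  simp [PySem.Str.len_eq]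

lemma len_empty : PySem.Str.len "" = 0 := by
  simp [PySem.Str.len_eq]

lemma len_zero_iff (s : String) : PySem.Str.len s = 0 ↔ s = "" := by
  simp [PySem.Str.len_eq]

lemma insertBy_nil (bef : String → String → Bool) (x : String) :
    PySem.List.insertBy bef x [] = [x] := rfl

lemma insertBy_cons (bef : String → String → Bool) (x y : String) (ys : List String) :
    PySem.List.insertBy bef x (y :: ys)
      = if bef x y then x :: y :: ys else y :: PySem.List.insertBy bef x ys := rfl

lemma fs_cons_pos (q n : String) (h : PySem.Str.isIn n q = true) (t : List String) :
    firstSubstring q (n :: t) = n := by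
  simp only [firstSubstring]; rw [if_pos h]

lemma fs_cons_neg (q n : String) (h : PySem.Str.isIn n q = false) (t : List String) :
    firstSubstring q (n :: t) = firstSubstring q t := by
  simp only [firstSubstring]
  rw [if_neg]
  intro hc; rw [h] at hc; exact Bool.false_ne_true hc

lemma firstSubstring_mem (q : String) (l : List String) :
    firstSubstring q l = "" ∨ firstSubstring q l ∈ l := by
  induction l with
  | nil => left; rfl
  | cons y ys ih =>
    cases h : PySem.Str.isIn y q with
    | true => right; rw [fs_cons_pos q y h]; exact List.mem_cons_self
    | false =>
      rw [fs_cons_neg q y h]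
      rcases ih with h' | h'
      · left; exact h'
      · right; exact List.mem_cons_of_mem _ h'

lemma firstSubstring_len_le (q y : String) (ys : List String)
    (hp : (y :: ys).Pairwise lenDesc) :
    PySem.Str.len (firstSubstring q (y :: ys)) ≤ PySem.Str.len y := by
  rcases firstSubstring_mem q (y :: ys) with h | h
  · rw [h, len_empty]; exact len_nonneg y
  · rcases List.mem_cons.mp h with h' | h'
    · rw [h']
    · exact (List.pairwise_cons.mp hp).1 _ h'

lemma pairwise_insertBy (x : String) (l : List String) (hp : l.Pairwise lenDesc) :
    (PySem.List.insertBy befLen x l).Pairwise lenDesc := by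
  induction l with
  | nil =>
    rw [insertBy_nil]
    exact List.pairwise_singleton _ _
  | cons y ys ih =>
    rcases List.pairwise_cons.mp hp with ⟨hy, hys⟩
    by_cases h : PySem.Str.len y < PySem.Str.len x
    · have hbt : befLen x y = true := by unfold befLen; exact decide_eq_true h
      rw [insertBy_cons, if_pos hbt]
      refine List.pairwise_cons.mpr ⟨?_, hp⟩
      intro b hb
      rcases List.mem_cons.mp hb with hb | hb
      · rw [hb]; exact le_of_lt h
      · exact le_of_lt (lt_of_le_of_lt (hy b hb) h)
    · have hbf : befLen x y = false := by unfold befLen; exact decide_eq_false h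
      rw [insertBy_cons, if_neg (by rw [hbf]; exact Bool.false_ne_true)]
      refine List.pairwise_cons.mpr ⟨?_, ih hys⟩
      intro b hb
      rcases (PySem.List.mem_insertBy _ _ _ _).mp hb with hb | hb
      · rw [hb]; exact le_of_not_gt h
      · exact hy b hb

lemma firstSubstring_insertBy (q x : String) (l : List String)
    (hp : l.Pairwise lenDesc) :
    firstSubstring q (PySem.List.insertBy befLen x l)
      = if PySem.Str.isIn x q = true ∧
           PySem.Str.len (firstSubstring q l) < PySem.Str.len x then x
        else firstSubstring q l := by
  induction l with
  | nil =>
    rw [insertBy_nil]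
    cases h : PySem.Str.isIn x q with
    | true =>
      rw [fs_cons_pos q x h]
      by_cases hl : PySem.Str.len (firstSubstring q ([] : List String)) < PySem.Str.len x
      · rw [if_pos ⟨rfl, hl⟩]
      · rw [if_neg (fun hc => hl hc.2)]
        have h0 : PySem.Str.len x = 0 := by
          have := len_nonneg x
          have hle : PySem.Str.len x ≤ PySem.Str.len (firstSubstring q ([] : List String)) :=
            le_of_not_gt hl
          rw [show firstSubstring q ([] : List String) = "" from rfl, len_empty] at hle
          omega
        rw [(len_zero_iff x).mp h0]
        rfl
    | false =>
      rw [fs_cons_neg q x h]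
      rw [if_neg (fun hc => Bool.false_ne_true hc.1)]
  | cons y ys ih =>
    rcases List.pairwise_cons.mp hp with ⟨hy, hys⟩
    by_cases h : PySem.Str.len y < PySem.Str.len x
    · have hbt : befLen x y = true := by unfold befLen; exact decide_eq_true h
      rw [insertBy_cons, if_pos hbt]
      have hlt : PySem.Str.len (firstSubstring q (y :: ys)) < PySem.Str.len x :=
        lt_of_le_of_lt (firstSubstring_len_le q y ys hp) h
      cases hx : PySem.Str.isIn x q with
      | true =>
        rw [fs_cons_pos q x hx, if_pos ⟨rfl, hlt⟩]
      | false =>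
        rw [fs_cons_neg q x hx]
        rw [if_neg (fun hc => Bool.false_ne_true hc.1)]
    · have hbf : befLen x y = false := by unfold befLen; exact decide_eq_false h
      rw [insertBy_cons, if_neg (by rw [hbf]; exact Bool.false_ne_true)]
      cases hyq : PySem.Str.isIn y q with
      | true =>
        simp only [fs_cons_pos q y hyq]
        rw [if_neg (fun hc => h hc.2)]
      | false =>
        simp only [fs_cons_neg q y hyq]
        exact ih hys

lemma firstSubstring_foldl (q : String) (xs : List String) (acc : List String)
    (hp : acc.Pairwise lenDesc) :
    firstSubstring q (xs.foldl (fun a x => PySem.List.insertBy befLen x a) acc)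
      = xs.foldl
          (fun b n => if PySem.Str.isIn n q = true ∧
              PySem.Str.len b < PySem.Str.len n then n else b)
          (firstSubstring q acc) := by
  induction xs generalizing acc with
  | nil => rfl
  | cons x t ih =>
    simp only [List.foldl_cons]
    rw [ih _ (pairwise_insertBy x acc hp), firstSubstring_insertBy q x acc hp]

lemma afold (q : String) (ys : List String) (b : String) :
    ys.foldl
      (fun (st : Int × String) name =>
        if PySem.Str.isIn name q = true then
          (if PySem.Str.len name > st.1 then (PySem.Str.len name, name) else st)
        else st)
      (PySem.Str.len b, b)
    = (PySem.Str.len (ys.foldl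
        (fun c n => if PySem.Str.isIn n q = true ∧
            PySem.Str.len c < PySem.Str.len n then n else c) b),
       ys.foldl (fun c n => if PySem.Str.isIn n q = true ∧
            PySem.Str.len c < PySem.Str.len n then n else c) b) := by
  induction ys generalizing b with
  | nil => rfl
  | cons n t ih =>
    simp only [List.foldl_cons]
    cases hn : PySem.Str.isIn n q with
    | true =>
      rw [if_pos (rfl : (true : Bool) = true)]
      by_cases h : PySem.Str.len b < PySem.Str.len n
      · rw [if_pos (show PySem.Str.len n > (PySem.Str.len b, b).1 from h),
            if_pos ⟨rfl, h⟩]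
        exact ih n
      · rw [if_neg (show ¬ PySem.Str.len n > (PySem.Str.len b, b).1 from h),
            if_neg (fun hc => h hc.2)]
        exact ih b
    | false =>
      rw [if_neg Bool.false_ne_true,
          if_neg (fun hc => Bool.false_ne_true hc.1)]
      exact ih b

-- ===== VERDICT (by name: the statement is the Claim_ definition above) =====
theorem get_correct_name_spec : Claim_equal_get_correct_name := by
  intro q xs _
  show ((xs.filter (fun name => PySem.Str.isIn name q)).foldl
      (fun (st : Int × String) name =>
        if PySem.Str.len name > st.1 then (PySem.Str.len name, name) else st)
      ((0 : Int), "")).2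
    = firstSubstring q (PySem.List.sorted xs PySem.Str.len true)
  rw [PySem.List.sorted_rev_eq_foldl_insertBy]
  show _ = firstSubstring q (xs.foldl (fun a x => PySem.List.insertBy befLen x a) [])
  rw [firstSubstring_foldl q xs [] List.Pairwise.nil]
  rw [List.foldl_filter]
  rw [show ((0 : Int), "") = (PySem.Str.len "", "") by rw [len_empty]]
  rw [afold]
  rfl
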